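/- GENERATED by farm/mkstatement.py from design/units.tsv (unit `DGifGetExtension.2`) and the assertions of Gif/Spec/Seg_DGifGetExtension.lean — do not edit.
   THE STATEMENT of the proof unit `DGifGetExtension.2`: segment 2 of `DGifGetExtension` (9 instructions; entries 0x109b45;
   exits 0x109afb; ranges 0x109b45-0x109b67)
   takes each of its entry assertions to one of its exit assertions (`Gif.Spec.DGifGetExtension.Seg2`), given the contracts of its callees.
   What the names mean: ProgX/Base/Spec/Basic.lean (the shared hypotheses), Gif/Spec/Seg_DGifGetExtension.lean (the assertions). The theorem to prove:
   `theorem DGifGetExtension_2_ok : Gif.Spec.DGifGetExtension_2.Statement`. -/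
import Gif.Code
import Gif.Dec.All
import Gif.Labels
import Gif.Spec.Reader
import Gif.Spec.Seg_DGifGetExtension
namespace Gif.Spec.DGifGetExtension_2
open X86 X86.User Asan

/-- The statement of unit `DGifGetExtension.2`. -/
def Statement : Prop :=
  ∀ (Lay : Layout) (_hLay : Lay.hi = 0x1000000) (μ : Microarch) (_hμ : UserX.MicroOK μ) (u₀ : State)
    (_hcode : HasCodeNat Lay u₀ Gif.L.DGifGetExtension.entry Gif.Code.code_DGifGetExtension.nat Gif.L.DGifGetExtension.size)
    (_h_DGifGetExtensionNext : ∀ (H : Heap) (rest : List Obj) (frames : List (Nat × FrameLayout)) (F : Forest) (R : Rd), Calls Lay μ ProgX.Base.WayInv (ProgX.Base.conv u₀) Gif.L.DGifGetExtensionNext.entry (Gif.Spec.DGifGetExtensionNext.spec H rest frames F R))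
    (_h_asan_store4_noabort : Asan.SmallCheck Lay μ ProgX.Base.WayInv (ProgX.Base.CodeOK u₀) [.rax, .rcx, .rdx] 4 ProgX.Base.L.__asan_store4_noabort.entry),
    Gif.Spec.DGifGetExtension.Seg2 Lay μ u₀

end Gif.Spec.DGifGetExtension_2
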